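-- pv_equiv track=rewrite | github.com/nastyh/LeetCode | Basic Data Structures/sentence_meaning_snap.py | sentences_equivalent
-- ===== SOURCE A (Python) =====
-- from typing import List
--
-- class UnionFind:
--     def __init__(self):
--         self.parent = {}
--
--     def find(self, x: str) -> str:
--         # path compression
--         if x not in self.parent:
--             self.parent[x] = x
--         while x != self.parent[x]:
--             self.parent[x] = self.parent[self.parent[x]]
--             x = self.parent[x]
--         return x
--
--     def union(self, a: str, b: str):
--         pa, pb = self.find(a), self.find(b)
--         if pa != pb:
--             self.parent[pb] = pa
--
-- def sentences_equivalent(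
--     sent1: str,
--     sent2: str,
--     groups_of_syns: List[List[str]]
-- ) -> bool:
--     # 1. Tokenize (here we assume simple whitespace-split & lowercase)
--     words1 = sent1.lower().split()
--     words2 = sent2.lower().split()
--     if len(words1) != len(words2):
--         return False
--
--     # 2. Build DSU over all synonyms
--     uf = UnionFind()
--     for group in groups_of_syns:
--         # union every word in the group with the first one
--         first = group[0].lower()
--         for w in group[1:]:
--             uf.union(first, w.lower())
--
--     # 3. Compare position by position
--     for w1, w2 in zip(words1, words2):
--         if w1 == w2:
--             continue
--         # if neither word seen in UF, find() will initialize them to be their own parent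
--         if uf.find(w1) != uf.find(w2):
--             return False
--
--     return True
-- ===== SOURCE B (Python) =====
-- def sentences_equivalent(sent1, sent2, groups_of_syns):
--     words1 = sent1.lower().split()
--     words2 = sent2.lower().split()
--     if len(words1) != len(words2):
--         return False
--
--     # quick-find with union by size: label[w] = class label of w,
--     # members[l] = words currently labelled l
--     label = {}
--     members = {}
--     for group in groups_of_syns:
--         first = group[0].lower()
--         for w in group[1:]:
--             a, b = first, w.lower()
--             if a not in label:
--                 label[a] = a
--                 members[a] = [a]
--             la = label[a]
--             if b not in label:
--                 label[b] = b
--                 members[b] = [b]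
--             lb = label[b]
--             if la != lb:
--                 # relabel the smaller class
--                 if len(members[la]) < len(members[lb]):
--                     la, lb = lb, la
--                 for x in members[lb]:
--                     label[x] = la
--                 members[la].extend(members[lb])
--
--     return all(w1 == w2 or label.get(w1, w1) == label.get(w2, w2)
--                for w1, w2 in zip(words1, words2))
-- ===== Notes on version B (the rewrite author's own statement) =====
-- stated objective: alternative
-- what changed: Replaces the quick-union DSU (a parent forest mutated by find with path halving) by a quick-find structure: a flat word-to-class-label dict plus per-class member lists, merged by relabelling the smaller class, with the final comparison done as an all(...) over the zipped token lists instead of a find/find early-return loop.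
import Mathlib
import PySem

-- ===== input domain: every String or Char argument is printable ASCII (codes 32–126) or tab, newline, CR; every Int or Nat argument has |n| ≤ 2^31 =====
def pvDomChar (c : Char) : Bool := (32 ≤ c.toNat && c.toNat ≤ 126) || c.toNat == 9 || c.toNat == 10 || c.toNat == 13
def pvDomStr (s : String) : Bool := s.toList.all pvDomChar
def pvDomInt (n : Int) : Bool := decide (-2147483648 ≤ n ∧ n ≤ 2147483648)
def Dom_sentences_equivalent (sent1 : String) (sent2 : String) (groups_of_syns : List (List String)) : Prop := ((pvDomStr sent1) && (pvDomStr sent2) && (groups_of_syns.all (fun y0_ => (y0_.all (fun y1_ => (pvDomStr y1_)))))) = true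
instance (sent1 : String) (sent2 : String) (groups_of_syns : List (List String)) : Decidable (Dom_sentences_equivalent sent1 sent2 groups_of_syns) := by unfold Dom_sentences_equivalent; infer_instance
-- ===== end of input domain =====

-- B replaces A's quick-union DSU (parent forest, find with path halving) by a quick-find
-- structure (label dict + per-class member lists, merging by relabelling the smaller class);
-- return values agree, A and B mutate only local state.

-- ===== PORT A =====

-- the while-loop of UnionFind.find, with path halving; fuel is only a totality guard
-- (the supplied fuel is proved sufficient on the dicts the algorithm builds)
def pvFindLoop (fuel : Nat) (d : PySem.Dict String String) (x : String) :
    String × PySem.Dict String String :=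
  match fuel with
  | 0 => (x, d)
  | fuel + 1 =>
    let px := d.getD x x
    if x = px then (x, d)
    else
      let gp := d.getD px px
      pvFindLoop fuel (d.insert x gp) gp

-- UnionFind.find: "if x not in parent: parent[x] = x" then the while loop
def pvFind (d : PySem.Dict String String) (x : String) :
    String × PySem.Dict String String :=
  let d1 := if d.contains x then d else d.insert x x
  pvFindLoop (d1.size + 1) d1 x

-- UnionFind.union
def pvUnion (d : PySem.Dict String String) (a b : String) : PySem.Dict String String :=
  let pad := pvFind d a
  let pbd := pvFind pad.2 b
  if pad.1 ≠ pbd.1 then pbd.2.insert pbd.1 pad.1 else pbd.2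

-- the comparison loop of step 3 (early return False)
def pvCheck (d : PySem.Dict String String) (ps : List (String × String)) : Bool :=
  match ps with
  | [] => true
  | (w1, w2) :: rest =>
    if w1 = w2 then pvCheck d rest
    else
      let r1d := pvFind d w1
      let r2d := pvFind r1d.2 w2
      if r1d.1 ≠ r2d.1 then false else pvCheck r2d.2 rest

def sentences_equivalent (sent1 : String) (sent2 : String)
    (groups_of_syns : List (List String)) : Bool :=
  let words1 := PySem.Str.split₀ (PySem.Str.lower sent1)
  let words2 := PySem.Str.split₀ (PySem.Str.lower sent2)
  if words1.length ≠ words2.length then false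
  else
    let d := groups_of_syns.foldl (fun d group =>
      let first := PySem.Str.lower (PySem.List.pyGetD group 0 "")  -- group[0]: raises on [], excluded by Pre_
      (group.drop 1).foldl (fun d w => pvUnion d first (PySem.Str.lower w)) d)
      PySem.Dict.empty
    pvCheck d (words1.zip words2)

-- ===== PORT B =====

-- merge the classes of a and b in the quick-find structure (label dict + class member lists)
-- by relabelling the members of b's class
def pvBUnion (lm : PySem.Dict String String × PySem.Dict String (List String))
    (a b : String) : PySem.Dict String String × PySem.Dict String (List String) :=
  let m0 := lm.1
  let c0 := lm.2
  let m1 := if m0.contains a then m0 else m0.insert a a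
  let c1 := if m0.contains a then c0 else c0.insert a [a]
  let la := m1.getD a a
  let m2 := if m1.contains b then m1 else m1.insert b b
  let c2 := if m1.contains b then c1 else c1.insert b [b]
  let lb := m2.getD b b
  if la ≠ lb then
    let la' := if (c2.getD la []).length < (c2.getD lb []).length then lb else la
    let lb' := if (c2.getD la []).length < (c2.getD lb []).length then la else lb
    let ms := c2.getD lb' []
    (ms.foldl (fun m x => m.insert x la') m2, c2.insert la' (c2.getD la' [] ++ ms))
  else (m2, c2)

def sentences_equivalent_alt (sent1 : String) (sent2 : String)
    (groups_of_syns : List (List String)) : Bool :=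
  let words1 := PySem.Str.split₀ (PySem.Str.lower sent1)
  let words2 := PySem.Str.split₀ (PySem.Str.lower sent2)
  if words1.length ≠ words2.length then false
  else
    let lm := groups_of_syns.foldl (fun lm group =>
      let first := PySem.Str.lower (PySem.List.pyGetD group 0 "")  -- group[0]: raises on [], excluded by Pre_
      (group.drop 1).foldl (fun lm w => pvBUnion lm first (PySem.Str.lower w)) lm)
      (PySem.Dict.empty, PySem.Dict.empty)
    (words1.zip words2).all (fun p => p.1 == p.2 || lm.1.getD p.1 p.1 == lm.1.getD p.2 p.2)

-- ===== PRECONDITION & SPEC =====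
-- Pre_ excludes exactly the inputs on which A (and B) raise IndexError at group[0]: an empty
-- synonym group is reached only when the two sentences have the same number of tokens
-- (otherwise A returns False before touching the groups).
def Pre_sentences_equivalent (sent1 : String) (sent2 : String)
    (groups_of_syns : List (List String)) : Prop :=
  (PySem.Str.split₀ (PySem.Str.lower sent1)).length ≠
      (PySem.Str.split₀ (PySem.Str.lower sent2)).length ∨
    ∀ g ∈ groups_of_syns, g ≠ []
instance (sent1 : String) (sent2 : String) (groups_of_syns : List (List String)) :
    Decidable (Pre_sentences_equivalent sent1 sent2 groups_of_syns) := by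
  unfold Pre_sentences_equivalent; infer_instance

def pvWitness_sentences_equivalent : String × String × List (List String) :=
  ("Big cat", "big feline", [["Cat", "feline"]])

def Spec_sentences_equivalent (sent1 : String) (sent2 : String) (groups_of_syns : List (List String)) (out : Bool) : Prop := out = sentences_equivalent_alt sent1 sent2 groups_of_syns
instance (sent1 : String) (sent2 : String) (groups_of_syns : List (List String)) (out : Bool) : Decidable (Spec_sentences_equivalent sent1 sent2 groups_of_syns out) := by unfold Spec_sentences_equivalent; infer_instance

-- ===== CLAIM (what is proved, stated in full; the proofs are below) =====
def Claim_equal_sentences_equivalent : Prop := ∀ (sent1 : String) (sent2 : String) (groups_of_syns : List (List String)), Dom_sentences_equivalent sent1 sent2 groups_of_syns → Pre_sentences_equivalent sent1 sent2 groups_of_syns → Spec_sentences_equivalent sent1 sent2 groups_of_syns (sentences_equivalent sent1 sent2 groups_of_syns)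

-- ===== LEMMAS AND PROOFS =====

-- ---- generic notions about A's parent dict ----

def pvP (d : PySem.Dict String String) (x : String) : String := d.getD x x
def pvIter (d : PySem.Dict String String) (n : Nat) (x : String) : String := (pvP d)^[n] x
abbrev pvFix (d : PySem.Dict String String) (x : String) : Prop := pvP d x = x
def pvReach (d : PySem.Dict String String) (x : String) : Prop :=
  ∃ n, pvFix d (pvIter d n x)
-- well-formed parent dict: parent of a key is a key; every chain reaches a root within size steps
def pvWF (d : PySem.Dict String String) : Prop :=
  (∀ k ∈ d.keys, pvP d k ∈ d.keys) ∧ ∀ x, ∃ n ≤ d.size, pvFix d (pvIter d n x)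
def pvRoot (d : PySem.Dict String String) (x : String) : String := pvIter d d.size x
def pvH (d : PySem.Dict String String) (x : String) (he : pvReach d x) : Nat := Nat.find he

theorem pvH_spec (d : PySem.Dict String String) (x : String) (he : pvReach d x) :
    pvFix d (pvIter d (pvH d x he) x) := Nat.find_spec he
theorem pvH_min {d : PySem.Dict String String} {x : String} (he : pvReach d x)
    {m : Nat} (hm : m < pvH d x he) : ¬ pvFix d (pvIter d m x) := Nat.find_min he hm
theorem pvH_le_of_fix {d : PySem.Dict String String} {x : String} (he : pvReach d x)
    {n : Nat} (hf : pvFix d (pvIter d n x)) : pvH d x he ≤ n := Nat.find_le hf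

-- B's label lookup and invariant
def pvLab (m : PySem.Dict String String) (x : String) : String := m.getD x x
def pvMWF (m : PySem.Dict String String) (c : PySem.Dict String (List String)) : Prop :=
  m.keys.Nodup ∧ (∀ v ∈ m.values, v ∈ m.keys) ∧
    ∀ l, (∃ k ∈ m.keys, pvLab m k = l) →
      ∀ y, (y ∈ c.getD l [] ↔ y ∈ m.keys ∧ pvLab m y = l)

-- the joint invariant of phase 2
def pvInv (d : PySem.Dict String String)
    (lm : PySem.Dict String String × PySem.Dict String (List String)) : Prop :=
  pvWF d ∧ pvMWF lm.1 lm.2 ∧ ∀ x y, (pvRoot d x = pvRoot d y ↔ pvLab lm.1 x = pvLab lm.1 y)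

theorem pvIter_succ (d : PySem.Dict String String) (n : Nat) (x : String) :
    pvIter d (n + 1) x = pvIter d n (pvP d x) := by
  simp [pvIter, Function.iterate_succ_apply]
theorem pvIter_succ' (d : PySem.Dict String String) (n : Nat) (x : String) :
    pvIter d (n + 1) x = pvP d (pvIter d n x) := by
  simp [pvIter, Function.iterate_succ_apply']
theorem pvIter_add (d : PySem.Dict String String) (m n : Nat) (x : String) :
    pvIter d (m + n) x = pvIter d n (pvIter d m x) := by
  simp [pvIter, Nat.add_comm m n, Function.iterate_add_apply]
theorem pvFix_iter {d : PySem.Dict String String} {y : String} (h : pvFix d y) (n : Nat) :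
    pvIter d n y = y := by
  induction n with
  | zero => rfl
  | succ n ih => rw [pvIter_succ', ih]; exact h
theorem pvRoot_eq_of_fix_le {d : PySem.Dict String String} {n : Nat} {x : String}
    (hf : pvFix d (pvIter d n x)) (hn : n ≤ d.size) : pvRoot d x = pvIter d n x := by
  have : d.size = n + (d.size - n) := by omega
  rw [pvRoot, this, pvIter_add, pvFix_iter hf]
theorem pvRoot_fix {d : PySem.Dict String String} (hw : pvWF d) (x : String) :
    pvFix d (pvRoot d x) := by
  obtain ⟨n, hn, hf⟩ := hw.2 x
  rw [pvRoot_eq_of_fix_le hf hn]; exact hf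
theorem pvRoot_eq_of_fix {d : PySem.Dict String String} (hw : pvWF d) {n : Nat} {x : String}
    (hf : pvFix d (pvIter d n x)) : pvRoot d x = pvIter d n x := by
  rcases Nat.le_total n d.size with h | h
  · exact pvRoot_eq_of_fix_le hf h
  · have h2 : n = d.size + (n - d.size) := by omega
    rw [h2, pvIter_add]
    have h3 : pvIter d d.size x = pvRoot d x := rfl
    rw [h3, pvFix_iter (pvRoot_fix hw x)]
theorem pvRoot_of_fix {d : PySem.Dict String String} {x : String} (hf : pvFix d x) :
    pvRoot d x = x := pvFix_iter hf d.size
theorem pvRoot_p {d : PySem.Dict String String} (hw : pvWF d) (x : String) :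
    pvRoot d (pvP d x) = pvRoot d x := by
  have h1 : pvRoot d (pvP d x) = pvP d (pvRoot d x) := by
    rw [pvRoot, ← pvIter_succ, pvIter_succ']; rfl
  rw [h1, pvRoot_fix hw x]
theorem pvP_not_mem {d : PySem.Dict String String} {x : String} (hx : x ∉ d.keys) :
    pvP d x = x := by
  have hc : d.contains x = false := by
    by_contra h
    exact hx ((PySem.Dict.contains_iff_mem_keys d x).1 (by revert h; cases d.contains x <;> simp))
  exact PySem.Dict.getD_of_not_contains d x hc
theorem pvIter_mem {d : PySem.Dict String String} (hc : ∀ k ∈ d.keys, pvP d k ∈ d.keys)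
    {x : String} (hx : x ∈ d.keys) (n : Nat) : pvIter d n x ∈ d.keys := by
  induction n with
  | zero => exact hx
  | succ n ih => rw [pvIter_succ']; exact hc _ ih
theorem pvReach_of_wf {d : PySem.Dict String String} (hw : pvWF d) (x : String) :
    pvReach d x := by
  obtain ⟨n, _, hf⟩ := hw.2 x
  exact ⟨n, hf⟩
theorem pvReach_p {d : PySem.Dict String String} {x : String} (he : pvReach d x) :
    pvReach d (pvP d x) := by
  obtain ⟨n, hf⟩ := he
  cases n with
  | zero =>
    refine ⟨0, ?_⟩
    have hx : pvP d x = x := hf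
    simpa [pvIter, hx] using hf
  | succ k => exact ⟨k, by rw [← pvIter_succ]; exact hf⟩
theorem pvH_le {d : PySem.Dict String String} (hw : pvWF d) {x : String} (he : pvReach d x) :
    pvH d x he ≤ d.size := by
  obtain ⟨n, hn, hf⟩ := hw.2 x
  exact le_trans (pvH_le_of_fix he hf) hn
theorem pvH_succ {d : PySem.Dict String String} {x : String} (he : pvReach d x)
    (hx : ¬ pvFix d x) : pvH d x he = pvH d (pvP d x) (pvReach_p he) + 1 := by
  have h0 : 1 ≤ pvH d x he := by
    rcases Nat.eq_zero_or_pos (pvH d x he) with h | h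
    · exfalso; apply hx
      have hs := pvH_spec d x he
      rw [h] at hs; simpa [pvIter] using hs
    · exact h
  apply Nat.le_antisymm
  · apply pvH_le_of_fix
    have := pvH_spec d (pvP d x) (pvReach_p he)
    rw [← pvIter_succ] at this
    exact this
  · have h1 : pvH d x he = (pvH d x he - 1) + 1 := by omega
    have h2 := pvH_spec d x he
    rw [h1, pvIter_succ] at h2
    have := pvH_le_of_fix (pvReach_p he) h2
    omega
theorem pvIter_period {d : PySem.Dict String String} {a : String} {p : Nat}
    (hp : 0 < p) (ha : pvIter d p a = a) (s : Nat) :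
    pvIter d s a = pvIter d (s % p) a := by
  induction s using Nat.strong_induction_on with
  | _ s ih =>
    rcases Nat.lt_or_ge s p with h | h
    · rw [Nat.mod_eq_of_lt h]
    · have h1 : s = p + (s - p) := by omega
      calc pvIter d s a = pvIter d (s - p) (pvIter d p a) := by rw [← pvIter_add, ← h1]
        _ = pvIter d (s - p) a := by rw [ha]
        _ = pvIter d ((s - p) % p) a := ih _ (by omega)
        _ = pvIter d (s % p) a := by
            congr 1
            conv_rhs => rw [h1]
            rw [Nat.add_mod_left]

theorem pvOrbit_inj {d : PySem.Dict String String} {x : String} (he : pvReach d x)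
    {i j : Nat} (hij : i < j) (hj : j ≤ pvH d x he) : pvIter d i x ≠ pvIter d j x := by
  intro heq
  set p := j - i with hp
  have hp0 : 0 < p := by omega
  have ha : pvIter d p (pvIter d i x) = pvIter d i x := by
    rw [← pvIter_add, show i + p = j from by omega, ← heq]
  set h := pvH d x he with hh
  have hfixh : pvFix d (pvIter d h x) := pvH_spec d x he
  have hmain : pvIter d h x = pvIter d (i + (h - i) % p) x := by
    have h1 : h = i + (h - i) := by omega
    calc pvIter d h x = pvIter d (h - i) (pvIter d i x) := by rw [← pvIter_add, ← h1]
      _ = pvIter d ((h - i) % p) (pvIter d i x) := pvIter_period hp0 ha _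
      _ = pvIter d (i + (h - i) % p) x := by rw [← pvIter_add]
  have hm : i + (h - i) % p < h := by
    have := Nat.mod_lt (h - i) hp0
    omega
  exact pvH_min he hm (by rw [← hmain]; exact hfixh)

theorem pvH_lt_size {d : PySem.Dict String String} (hw : pvWF d) {x : String}
    (hx : x ∈ d.keys) (he : pvReach d x) : pvH d x he + 1 ≤ d.size := by
  classical
  have hmaps : ∀ i ∈ Finset.range (pvH d x he + 1), pvIter d i x ∈ d.keys.toFinset := by
    intro i _
    simpa using pvIter_mem hw.1 hx i
  have hinj : Set.InjOn (fun i => pvIter d i x) (Finset.range (pvH d x he + 1)) := by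
    intro i hi j hj hij
    simp only [Finset.coe_range, Set.mem_Iio] at hi hj
    rcases Nat.lt_trichotomy i j with h | h | h
    · exact absurd hij (pvOrbit_inj he h (by omega))
    · exact h
    · exact absurd hij.symm (pvOrbit_inj he h (by omega))
  have hcard := Finset.card_le_card_of_injOn _ hmaps hinj
  simp only [Finset.card_range] at hcard
  have hlen : d.keys.toFinset.card ≤ d.keys.length := d.keys.toFinset_card_le
  have hsize : d.keys.length = d.size := by
    simp [PySem.Dict.keys, PySem.Dict.size]
  omega

-- ---- operation O1: fresh self-insert ----
theorem pvO1 {d : PySem.Dict String String} (hw : pvWF d) {x : String} (hx : x ∉ d.keys) :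
    pvWF (d.insert x x) ∧ (∀ y, pvP (d.insert x x) y = pvP d y) ∧
      (∀ y, pvRoot (d.insert x x) y = pvRoot d y) ∧
      (∀ k, k ∈ (d.insert x x).keys ↔ k = x ∨ k ∈ d.keys) := by
  have hpf : pvP (d.insert x x) = pvP d := by
    funext y
    by_cases hy : y = x
    · subst hy
      simp only [pvP, PySem.Dict.getD_insert, if_pos rfl]
      exact (pvP_not_mem hx).symm
    · simp [pvP, PySem.Dict.getD_insert, hy]
  have hiter : ∀ n y, pvIter (d.insert x x) n y = pvIter d n y := by
    intro n y; simp [pvIter, hpf]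
  have hkeys : ∀ k, k ∈ (d.insert x x).keys ↔ k = x ∨ k ∈ d.keys := by
    intro k; simp [PySem.Dict.mem_keys_insert]
  have hsize : d.size ≤ (d.insert x x).size := by
    have hc : d.contains x = false := by
      by_contra h
      exact hx ((PySem.Dict.contains_iff_mem_keys d x).1 (by revert h; cases d.contains x <;> simp))
    simp [PySem.Dict.size_insert, hc]
  refine ⟨⟨?_, ?_⟩, fun y => congrFun hpf y, ?_, hkeys⟩
  · intro k hk
    rcases (hkeys k).1 hk with h | h
    · subst h
      rw [congrFun hpf k, pvP_not_mem hx]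
      exact hk
    · rw [congrFun hpf k]
      exact (hkeys _).2 (Or.inr (hw.1 k h))
  · intro y
    obtain ⟨n, hn, hf⟩ := hw.2 y
    exact ⟨n, le_trans hn hsize, by rw [pvFix, congrFun hpf, hiter]; exact hf⟩
  · intro y
    have h1 : pvRoot (d.insert x x) y = pvIter d (d.insert x x).size y := by
      rw [pvRoot, hiter]
    rw [h1]
    have h2 : ∀ m, d.size ≤ m → pvIter d m y = pvRoot d y := by
      intro m hm
      have : m = d.size + (m - d.size) := by omega
      rw [this, pvIter_add]
      exact pvFix_iter (pvRoot_fix hw y) _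
    exact h2 _ hsize

-- ---- operation O2: path-halving compression step ----
theorem pvO2 {d : PySem.Dict String String} (hw : pvWF d) {x : String} (hx : x ∈ d.keys)
    (hnf : ¬ pvFix d x) :
    pvWF (d.insert x (pvP d (pvP d x))) ∧
      (∀ y, pvRoot (d.insert x (pvP d (pvP d x))) y = pvRoot d y) ∧
      (∀ k, k ∈ (d.insert x (pvP d (pvP d x))).keys ↔ k ∈ d.keys) ∧
      (d.insert x (pvP d (pvP d x))).size = d.size ∧
      (∀ y (he' : pvReach (d.insert x (pvP d (pvP d x))) y) (he : pvReach d y),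
        pvH (d.insert x (pvP d (pvP d x))) y he' ≤ pvH d y he) := by
  set px := pvP d x with hpx
  set gp := pvP d px with hgp
  set d' := d.insert x gp with hd'
  -- parent function of d'
  have f1 : ∀ y, pvP d' y = if y = x then gp else pvP d y := by
    intro y
    by_cases hy : y = x
    · subst hy; simp [pvP, hd', PySem.Dict.getD_insert]
    · simp [pvP, hd', PySem.Dict.getD_insert, hy]
  have hx_in : x ∈ d.keys := hx
  have hpx_in : px ∈ d.keys := hw.1 x hx
  have hgp_in : gp ∈ d.keys := hw.1 px hpx_in
  -- gp ≠ x
  have f2 : gp ≠ x := by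
    intro hgx
    have horb : ∀ n, pvIter d n x = x ∨ pvIter d n x = px := by
      intro n
      induction n with
      | zero => exact Or.inl rfl
      | succ n ih =>
        rw [pvIter_succ']
        rcases ih with h | h
        · rw [h]; exact Or.inr rfl
        · rw [h, ← hgp, hgx]; exact Or.inl rfl
    have hpxnf : ¬ pvFix d px := by
      intro h
      apply hnf
      have h2 : px = x := by rw [← hgx, hgp]; exact h.symm
      show pvP d x = x
      rw [← hpx, h2]
    obtain ⟨n, _, hf⟩ := hw.2 x
    rcases horb n with h | h <;> rw [h] at hf
    · exact hnf hf
    · exact hpxnf hf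
  have hfix' : ∀ z, z ≠ x → (pvFix d' z ↔ pvFix d z) := by
    intro z hz
    rw [pvFix, pvFix, f1, if_neg hz]
  have hnfx' : ¬ pvFix d' x := by
    rw [pvFix, f1, if_pos rfl]; exact f2
  -- keys and size
  have f3 : ∀ k, k ∈ d'.keys ↔ k ∈ d.keys := by
    intro k
    rw [hd']
    simp [PySem.Dict.mem_keys_insert]
    intro h; subst h; exact hx
  have hcont : d.contains x = true := (PySem.Dict.contains_iff_mem_keys d x).2 hx
  have f4 : d'.size = d.size := by simp [hd', PySem.Dict.size_insert, hcont]
  -- the main orbit lemma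
  have main : ∀ N y (hey : pvReach d y), pvH d y hey ≤ N →
      ∃ n ≤ pvH d y hey, pvIter d' n y = pvRoot d y := by
    intro N
    induction N with
    | zero =>
      intro y hey hN
      -- pvH = 0: y is a d-fixpoint
      have hfy : pvFix d y := by
        have := pvH_spec d y hey
        rw [Nat.le_zero.1 hN] at this
        simpa [pvIter] using this
      exact ⟨0, Nat.zero_le _, (pvRoot_of_fix hfy).symm⟩
    | succ N ih =>
      intro y hey hN
      by_cases hfy : pvFix d y
      · exact ⟨0, Nat.zero_le _, (pvRoot_of_fix hfy).symm⟩
      · have hy_ne_or : True := trivial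
        by_cases hyx : y = x
        · -- y = x : jump to gp
          subst hyx
          have hegp : pvReach d gp := pvReach_p (pvReach_p hey)
          have hroot : pvRoot d gp = pvRoot d y := by
            rw [hgp, hpx, pvRoot_p hw, pvRoot_p hw]
          have hepx : pvReach d px := pvReach_p hey
          have hHy : pvH d y hey = pvH d px hepx + 1 := pvH_succ hey hfy
          have hHgp : pvH d gp hegp < pvH d y hey := by
            by_cases hfpx : pvFix d px
            · have hgppx : gp = px := hfpx
              have : pvH d gp hegp = 0 := by
                apply Nat.le_zero.1
                apply pvH_le_of_fix
                simpa [pvIter, hgppx] using hfpx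
              omega
            · have := pvH_succ hepx hfpx
              have hsame : pvH d (pvP d px) (pvReach_p hepx) = pvH d gp hegp := rfl
              omega
          obtain ⟨n, hn, hiter⟩ := ih gp hegp (by omega)
          refine ⟨n + 1, by omega, ?_⟩
          rw [pvIter_succ, f1, if_pos rfl, hiter, hroot]
        · -- y ≠ x : ordinary step
          have hepy : pvReach d (pvP d y) := pvReach_p hey
          have hHy : pvH d y hey = pvH d (pvP d y) hepy + 1 := pvH_succ hey hfy
          obtain ⟨n, hn, hiter⟩ := ih (pvP d y) hepy (by omega)
          refine ⟨n + 1, by omega, ?_⟩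
          rw [pvIter_succ, f1, if_neg hyx, hiter, pvRoot_p hw]
  -- root d y is a d'-fixpoint
  have hrootfix : ∀ y, pvFix d' (pvRoot d y) := by
    intro y
    have hne : pvRoot d y ≠ x := by
      intro h
      exact hnf (h ▸ pvRoot_fix hw y)
    exact (hfix' _ hne).2 (pvRoot_fix hw y)
  have hreach' : ∀ y, ∃ n ≤ d'.size, pvFix d' (pvIter d' n y) := by
    intro y
    have hey := pvReach_of_wf hw y
    obtain ⟨n, hn, hiter⟩ := main (pvH d y hey) y hey le_rfl
    exact ⟨n, by rw [f4]; exact le_trans hn (pvH_le hw hey), by rw [hiter]; exact hrootfix y⟩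
  have hwf' : pvWF d' := by
    refine ⟨?_, hreach'⟩
    intro k hk
    rw [f1]
    by_cases hkx : k = x
    · rw [if_pos hkx]; exact (f3 _).2 hgp_in
    · rw [if_neg hkx]; exact (f3 _).2 (hw.1 k ((f3 _).1 hk))
  refine ⟨hwf', ?_, f3, f4, ?_⟩
  · intro y
    have hey := pvReach_of_wf hw y
    obtain ⟨n, hn, hiter⟩ := main (pvH d y hey) y hey le_rfl
    rw [pvRoot_eq_of_fix hwf' (n := n) (by rw [hiter]; exact hrootfix y), hiter]
  · intro y he' he
    obtain ⟨n, hn, hiter⟩ := main (pvH d y he) y he le_rfl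
    exact le_trans (pvH_le_of_fix he' (by rw [hiter]; exact hrootfix y)) hn

-- ---- operation O3: linking two roots ----
theorem pvO3 {d : PySem.Dict String String} (hw : pvWF d) {pa pb : String}
    (hfa : pvFix d pa) (hfb : pvFix d pb) (hne : pa ≠ pb)
    (hpa : pa ∈ d.keys) (hpb : pb ∈ d.keys) :
    pvWF (d.insert pb pa) ∧
      ∀ y, pvRoot (d.insert pb pa) y = if pvRoot d y = pb then pa else pvRoot d y := by
  set d' := d.insert pb pa with hd'
  have f1 : ∀ y, pvP d' y = if y = pb then pa else pvP d y := by
    intro y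
    by_cases hy : y = pb
    · subst hy; simp [pvP, hd', PySem.Dict.getD_insert]
    · simp [pvP, hd', PySem.Dict.getD_insert, hy]
  have f3 : ∀ k, k ∈ d'.keys ↔ k ∈ d.keys := by
    intro k
    rw [hd']
    simp [PySem.Dict.mem_keys_insert]
    intro h; subst h; exact hpb
  have hcont : d.contains pb = true := (PySem.Dict.contains_iff_mem_keys d pb).2 hpb
  have f4 : d'.size = d.size := by simp [hd', PySem.Dict.size_insert, hcont]
  have hsz1 : 1 ≤ d.size := by
    have h1 : d.keys ≠ [] := by intro h; rw [h] at hpb; exact (List.not_mem_nil).elim hpb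
    have h2 : d.keys.length = d.size := by simp [PySem.Dict.keys, PySem.Dict.size]
    have := List.length_pos_iff.2 h1
    omega
  have hfixpa : pvFix d' pa := by rw [pvFix, f1, if_neg hne]; exact hfa
  have htfix : ∀ y, pvFix d' (if pvRoot d y = pb then pa else pvRoot d y) := by
    intro y
    by_cases h : pvRoot d y = pb
    · rw [if_pos h]; exact hfixpa
    · rw [if_neg h, pvFix, f1, if_neg h]; exact pvRoot_fix hw y
  have main : ∀ N y (hey : pvReach d y), pvH d y hey ≤ N →
      ∃ n ≤ pvH d y hey + 1, pvIter d' n y = (if pvRoot d y = pb then pa else pvRoot d y) := by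
    intro N
    induction N with
    | zero =>
      intro y hey hN
      have hfy : pvFix d y := by
        have := pvH_spec d y hey
        rw [Nat.le_zero.1 hN] at this
        simpa [pvIter] using this
      have hry : pvRoot d y = y := pvRoot_of_fix hfy
      by_cases hypb : y = pb
      · subst hypb
        refine ⟨1, by omega, ?_⟩
        rw [hry, if_pos rfl]
        show pvP d' y = pa
        rw [f1, if_pos rfl]
      · refine ⟨0, by omega, ?_⟩
        rw [hry, if_neg hypb]; rfl
    | succ N ih =>
      intro y hey hN
      by_cases hfy : pvFix d y
      · -- same as the base case
        have hry : pvRoot d y = y := pvRoot_of_fix hfy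
        by_cases hypb : y = pb
        · subst hypb
          refine ⟨1, by omega, ?_⟩
          rw [hry, if_pos rfl]
          show pvP d' y = pa
          rw [f1, if_pos rfl]
        · refine ⟨0, by omega, ?_⟩
          rw [hry, if_neg hypb]; rfl
      · have hypb : y ≠ pb := by intro h; subst h; exact hfy hfb
        have hepy : pvReach d (pvP d y) := pvReach_p hey
        have hHy : pvH d y hey = pvH d (pvP d y) hepy + 1 := pvH_succ hey hfy
        obtain ⟨n, hn, hiter⟩ := ih (pvP d y) hepy (by omega)
        refine ⟨n + 1, by omega, ?_⟩
        rw [pvIter_succ, f1, if_neg hypb, hiter, pvRoot_p hw]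
  have mainbound : ∀ y, ∃ n ≤ d.size,
      pvIter d' n y = (if pvRoot d y = pb then pa else pvRoot d y) := by
    intro y
    have hey := pvReach_of_wf hw y
    obtain ⟨n, hn, hiter⟩ := main (pvH d y hey) y hey le_rfl
    by_cases hyk : y ∈ d.keys
    · exact ⟨n, le_trans hn (pvH_lt_size hw hyk hey), hiter⟩
    · have hfy : pvFix d y := pvP_not_mem hyk
      have h0 : pvH d y hey = 0 := Nat.le_zero.1 (pvH_le_of_fix hey (by simpa [pvIter] using hfy))
      exact ⟨n, by omega, hiter⟩
  have hwf' : pvWF d' := by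
    constructor
    · intro k hk
      rw [f1]
      by_cases hkpb : k = pb
      · rw [if_pos hkpb]; exact (f3 _).2 hpa
      · rw [if_neg hkpb]; exact (f3 _).2 (hw.1 k ((f3 _).1 hk))
    · intro y
      obtain ⟨n, hn, hiter⟩ := mainbound y
      exact ⟨n, by rw [f4]; exact hn, by rw [hiter]; exact htfix y⟩
  refine ⟨hwf', ?_⟩
  intro y
  obtain ⟨n, hn, hiter⟩ := mainbound y
  rw [pvRoot_eq_of_fix hwf' (n := n) (by rw [hiter]; exact htfix y), hiter]

-- ---- find/union specs ----
theorem pvFindLoop_spec {d : PySem.Dict String String} (hw : pvWF d) {x : String}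
    (hx : x ∈ d.keys) {fuel : Nat} (he : pvReach d x) (hf : pvH d x he + 1 ≤ fuel) :
    (pvFindLoop fuel d x).1 = pvRoot d x ∧ pvWF (pvFindLoop fuel d x).2 ∧
      (∀ y, pvRoot (pvFindLoop fuel d x).2 y = pvRoot d y) ∧
      (∀ k, k ∈ (pvFindLoop fuel d x).2.keys ↔ k ∈ d.keys) := by
  induction fuel generalizing d x with
  | zero => omega
  | succ f ih =>
    by_cases hfx : x = d.getD x x
    · have hroot : pvRoot d x = x := pvRoot_of_fix (show pvP d x = x from hfx.symm)
      simp only [pvFindLoop, if_pos hfx]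
      exact ⟨hroot.symm, hw, fun _ => by trivial, fun _ => by trivial⟩
    · have hnf : ¬ pvFix d x := fun h => hfx (h.symm)
      have hgp : d.getD (d.getD x x) (d.getD x x) = pvP d (pvP d x) := rfl
      obtain ⟨hwf', hroot', hkeys', hsize', hH'⟩ := pvO2 hw hx hnf
      simp only [pvFindLoop, if_neg hfx]
      simp only [hgp]
      set gp := pvP d (pvP d x) with hgpdef
      set d'' := d.insert x gp with hd''
      have hgp_in : gp ∈ d.keys := hw.1 _ (hw.1 x hx)
      have hgp_in'' : gp ∈ d''.keys := (hkeys' _).2 hgp_in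
      have he'' : pvReach d'' gp := pvReach_of_wf hwf' gp
      have hegp : pvReach d gp := pvReach_of_wf hw gp
      have hepx : pvReach d (pvP d x) := pvReach_p he
      -- pvH d gp ≤ pvH d x - 1
      have hHx : pvH d x he = pvH d (pvP d x) hepx + 1 := pvH_succ he hnf
      have hHgp : pvH d gp hegp + 1 ≤ pvH d x he := by
        by_cases hfpx : pvFix d (pvP d x)
        · have hgppx : gp = pvP d x := hfpx
          have h0 : pvH d gp hegp = 0 := by
            apply Nat.le_zero.1
            apply pvH_le_of_fix
            simpa [pvIter, hgppx] using hfpx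
          omega
        · have h1 := pvH_succ hepx hfpx
          have h2 : pvH d (pvP d (pvP d x)) (pvReach_p hepx) = pvH d gp (pvReach_p hepx) := rfl
          have h3 : pvH d gp (pvReach_p hepx) = pvH d gp hegp := rfl
          omega
      have hfuel : pvH d'' gp he'' + 1 ≤ f := by
        have := hH' gp he'' hegp
        omega
      obtain ⟨ih1, ih2, ih3, ih4⟩ := ih hwf' hgp_in'' he'' hfuel
      refine ⟨?_, ih2, ?_, ?_⟩
      · rw [ih1, hroot', hgpdef, pvRoot_p hw, pvRoot_p hw]
      · intro y; rw [ih3, hroot']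
      · intro k; rw [ih4, hkeys']

theorem pvFind_spec {d : PySem.Dict String String} (hw : pvWF d) (x : String) :
    (pvFind d x).1 = pvRoot d x ∧ pvWF (pvFind d x).2 ∧
      (∀ y, pvRoot (pvFind d x).2 y = pvRoot d y) ∧
      (∀ k, k ∈ (pvFind d x).2.keys ↔ k = x ∨ k ∈ d.keys) := by
  by_cases hc : d.contains x
  · have hx : x ∈ d.keys := (PySem.Dict.contains_iff_mem_keys d x).1 hc
    have he : pvReach d x := pvReach_of_wf hw x
    have hfuel : pvH d x he + 1 ≤ d.size + 1 := by
      have := pvH_le hw he; omega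
    have hspec := pvFindLoop_spec hw hx he hfuel
    simp only [pvFind, if_pos hc]
    refine ⟨hspec.1, hspec.2.1, hspec.2.2.1, fun k => ?_⟩
    rw [hspec.2.2.2]
    constructor
    · exact Or.inr
    · rintro (h | h)
      · subst h; exact hx
      · exact h
  · have hx : x ∉ d.keys := fun h => hc ((PySem.Dict.contains_iff_mem_keys d x).2 h)
    obtain ⟨hwf1, hp1, hroot1, hkeys1⟩ := pvO1 hw hx
    have hx1 : x ∈ (d.insert x x).keys := (hkeys1 x).2 (Or.inl rfl)
    have he1 : pvReach (d.insert x x) x := pvReach_of_wf hwf1 x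
    have hfuel : pvH (d.insert x x) x he1 + 1 ≤ (d.insert x x).size + 1 := by
      have := pvH_le hwf1 he1; omega
    have hspec := pvFindLoop_spec hwf1 hx1 he1 hfuel
    simp only [pvFind, if_neg hc]
    refine ⟨?_, hspec.2.1, ?_, fun k => ?_⟩
    · rw [hspec.1, hroot1]
    · intro y; rw [hspec.2.2.1, hroot1]
    · rw [hspec.2.2.2, hkeys1]

theorem pvUnion_spec {d : PySem.Dict String String} (hw : pvWF d) (a b : String) :
    pvWF (pvUnion d a b) ∧
      ∀ y, pvRoot (pvUnion d a b) y =
        if pvRoot d a = pvRoot d b then pvRoot d y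
        else if pvRoot d y = pvRoot d b then pvRoot d a else pvRoot d y := by
  obtain ⟨ha1, ha2, ha3, ha4⟩ := pvFind_spec hw a
  obtain ⟨hb1, hb2, hb3, hb4⟩ := pvFind_spec ha2 b
  unfold pvUnion
  set pa := (pvFind d a).1 with hpa
  set d1 := (pvFind d a).2 with hd1
  set pb := (pvFind d1 b).1 with hpb
  set d2 := (pvFind d1 b).2 with hd2
  have hpav : pa = pvRoot d a := ha1
  have hpbv : pb = pvRoot d b := by rw [hb1, ha3]
  by_cases hroots : pvRoot d a = pvRoot d b
  · have : ¬ pa ≠ pb := by rw [hpav, hpbv, hroots]; simp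
    rw [if_neg this]
    refine ⟨hb2, fun y => ?_⟩
    rw [if_pos hroots, hb3, ha3]
  · have hne : pa ≠ pb := by rw [hpav, hpbv]; exact hroots
    rw [if_pos hne]
    have hroot2 : ∀ y, pvRoot d2 y = pvRoot d y := by
      intro y; rw [hb3, ha3]
    have hfa : pvFix d2 pa := by
      have h1 : pa = pvRoot d2 a := by rw [hroot2, hpav]
      rw [h1]; exact pvRoot_fix hb2 a
    have hfb : pvFix d2 pb := by
      have h1 : pb = pvRoot d2 b := by rw [hroot2, hpbv]
      rw [h1]; exact pvRoot_fix hb2 b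
    have ha_in : a ∈ d2.keys := (hb4 a).2 (Or.inr ((ha4 a).2 (Or.inl rfl)))
    have hb_in : b ∈ d2.keys := (hb4 b).2 (Or.inl rfl)
    have hpa_in : pa ∈ d2.keys := by
      have h1 : pa = pvRoot d2 a := by rw [hroot2, hpav]
      rw [h1, pvRoot]; exact pvIter_mem hb2.1 ha_in _
    have hpb_in : pb ∈ d2.keys := by
      have h1 : pb = pvRoot d2 b := by rw [hroot2, hpbv]
      rw [h1, pvRoot]; exact pvIter_mem hb2.1 hb_in _
    obtain ⟨hwf3, hroot3⟩ := pvO3 hb2 hfa hfb hne hpa_in hpb_in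
    refine ⟨hwf3, fun y => ?_⟩
    rw [hroot3 y, hroot2, if_neg hroots, hpav, hpbv]

-- ---- B-side helper lemmas ----
theorem pvLab_not_mem {m : PySem.Dict String String} {y : String} (hy : y ∉ m.keys) :
    pvLab m y = y := pvP_not_mem hy

theorem pvLab_mem_items {m : PySem.Dict String String} {y : String} (hy : y ∈ m.keys) :
    (y, pvLab m y) ∈ m.items := by
  have hc : m.contains y = true := (PySem.Dict.contains_iff_mem_keys m y).2 hy
  rw [PySem.Dict.contains_eq_isSome_get?] at hc
  obtain ⟨v, hv⟩ : ∃ v, m.get? y = some v := by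
    cases h : m.get? y with
    | none => rw [h] at hc; simp at hc
    | some v => exact ⟨v, rfl⟩
  have h1 : pvLab m y = v := by
    rw [pvLab, PySem.Dict.getD_eq_get?_getD, hv]; rfl
  rw [h1]
  exact PySem.Dict.mem_items_of_get?_eq_some m hv

theorem pvLab_mem_values {m : PySem.Dict String String} {y : String} (hy : y ∈ m.keys) :
    pvLab m y ∈ m.values := by
  have := pvLab_mem_items hy
  show pvLab m y ∈ m.items.map (·.2)
  exact List.mem_map.2 ⟨_, this, rfl⟩

theorem pvGetD_mem {m : PySem.Dict String String} (hnd : m.keys.Nodup) {y : String}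
    (hy : y ∈ m.keys) (d0 : String) : m.getD y d0 = pvLab m y :=
  PySem.Dict.getD_of_mem_items m (pvLab_mem_items hy) hnd d0

-- a loop 'for x in ms: m[x] = la', lookups and keys
theorem pvGetD_foldl_insert_const (ms : List String) (m : PySem.Dict String String)
    (la y d0 : String) :
    (ms.foldl (fun m x => m.insert x la) m).getD y d0 =
      if y ∈ ms then la else m.getD y d0 := by
  induction ms generalizing m with
  | nil => simp
  | cons x ms ih =>
    rw [List.foldl_cons, ih]
    by_cases h1 : y ∈ ms
    · rw [if_pos h1, if_pos (List.mem_cons.2 (Or.inr h1))]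
    · rw [if_neg h1, PySem.Dict.getD_insert]
      by_cases h2 : y = x
      · rw [if_pos h2, if_pos (List.mem_cons.2 (Or.inl h2))]
      · rw [if_neg h2, if_neg (by simp [h1, h2])]

theorem pvKeys_foldl_insert_const (ms : List String) (m : PySem.Dict String String)
    (la : String) (j : String) :
    j ∈ (ms.foldl (fun m x => m.insert x la) m).keys ↔ j ∈ m.keys ∨ j ∈ ms := by
  induction ms generalizing m with
  | nil => simp
  | cons x ms ih =>
    rw [List.foldl_cons, ih]
    constructor
    · rintro (h | h)
      · rcases (PySem.Dict.mem_keys_insert m x j la).1 h with h | h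
        · exact Or.inr (List.mem_cons.2 (Or.inl h))
        · exact Or.inl h
      · exact Or.inr (List.mem_cons.2 (Or.inr h))
    · rintro (h | h)
      · exact Or.inl ((PySem.Dict.mem_keys_insert m x j la).2 (Or.inr h))
      · rcases List.mem_cons.1 h with h | h
        · exact Or.inl ((PySem.Dict.mem_keys_insert m x j la).2 (Or.inl h))
        · exact Or.inr h

-- registering a fresh word as its own singleton class
theorem pvAdd_spec {m : PySem.Dict String String} {c : PySem.Dict String (List String)}
    (h : pvMWF m c) (k : String) :
    pvMWF (if m.contains k then m else m.insert k k)
        (if m.contains k then c else c.insert k [k]) ∧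
      (∀ y, pvLab (if m.contains k then m else m.insert k k) y = pvLab m y) ∧
      k ∈ (if m.contains k then m else m.insert k k).keys ∧
      (∀ j, j ∈ (if m.contains k then m else m.insert k k).keys ↔ j = k ∨ j ∈ m.keys) := by
  by_cases hc : m.contains k
  · rw [if_pos hc, if_pos hc]
    have hk : k ∈ m.keys := (PySem.Dict.contains_iff_mem_keys m k).1 hc
    exact ⟨h, fun _ => rfl, hk, fun j => ⟨Or.inr, fun hj => hj.elim (fun hj => hj ▸ hk) id⟩⟩
  · rw [if_neg hc, if_neg hc]
    have hk : k ∉ m.keys := fun hh => hc ((PySem.Dict.contains_iff_mem_keys m k).2 hh)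
    have hlab : ∀ y, pvLab (m.insert k k) y = pvLab m y := by
      intro y
      by_cases hy : y = k
      · subst hy
        simp only [pvLab, PySem.Dict.getD_insert, if_pos rfl]
        exact (pvLab_not_mem hk).symm
      · simp [pvLab, PySem.Dict.getD_insert, hy]
    have hkeys : ∀ j, j ∈ (m.insert k k).keys ↔ j = k ∨ j ∈ m.keys := by
      intro j; simp [PySem.Dict.mem_keys_insert]
    have hknew : k ∈ (m.insert k k).keys := (hkeys k).2 (Or.inl rfl)
    refine ⟨⟨?_, ?_, ?_⟩, hlab, hknew, hkeys⟩
    · exact PySem.Dict.nodup_keys_insert m k k h.1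
    · intro v hv
      rcases PySem.Dict.mem_values_insert m k k v hv with hh | hh
      · rw [hh]; exact hknew
      · exact (hkeys v).2 (Or.inr (h.2.1 v hh))
    · intro l hl y
      have hcget : (c.insert k [k]).getD l [] = if l = k then [k] else c.getD l [] :=
        PySem.Dict.getD_insert c k l [k] []
      by_cases hlk : l = k
      · subst hlk
        rw [hcget, if_pos rfl]
        constructor
        · intro hy
          have : y = l := by simpa using hy
          subst this
          exact ⟨hknew, hlab y ▸ pvLab_not_mem hk⟩
        · rintro ⟨hy1, hy2⟩
          rcases (hkeys y).1 hy1 with hh | hh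
          · simp [hh]
          · exfalso
            rw [hlab y] at hy2
            have : l ∈ m.values := hy2 ▸ pvLab_mem_values hh
            exact hk (h.2.1 _ this)
      · rw [hcget, if_neg hlk]
        obtain ⟨k', hk'1, hk'2⟩ := hl
        rcases (hkeys k').1 hk'1 with hh | hh
        · exfalso; apply hlk
          rw [← hk'2, hh, hlab, pvLab_not_mem (hh ▸ hk)]
        · have hold := h.2.2 l ⟨k', hh, by rw [← hk'2, hlab]⟩ y
          rw [hold]
          constructor
          · rintro ⟨hy1, hy2⟩
            exact ⟨(hkeys y).2 (Or.inr hy1), by rw [hlab]; exact hy2⟩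
          · rintro ⟨hy1, hy2⟩
            rcases (hkeys y).1 hy1 with hyk | hyk
            · exfalso; apply hlk
              rw [← hy2, hyk, hlab, pvLab_not_mem (hyk ▸ hk)]
            · exact ⟨hyk, by rw [hlab] at hy2; exact hy2⟩

-- merging class lb into class la by relabelling lb's members
theorem pvMerge_spec {m : PySem.Dict String String} {c : PySem.Dict String (List String)}
    (h : pvMWF m c) {la lb : String}
    (hla : ∃ k ∈ m.keys, pvLab m k = la) (hlb : ∃ k ∈ m.keys, pvLab m k = lb)
    (hne : la ≠ lb) :
    pvMWF ((c.getD lb []).foldl (fun m x => m.insert x la) m)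
        (c.insert la (c.getD la [] ++ c.getD lb [])) ∧
      ∀ y, pvLab ((c.getD lb []).foldl (fun m x => m.insert x la) m) y =
        if pvLab m y = lb then la else pvLab m y := by
  set ms := c.getD lb [] with hms
  set m' := ms.foldl (fun m x => m.insert x la) m with hm'
  have hmem : ∀ y, y ∈ ms ↔ y ∈ m.keys ∧ pvLab m y = lb := h.2.2 lb hlb
  have hla_in : la ∈ m.keys := by
    obtain ⟨k, hk1, hk2⟩ := hla
    exact h.2.1 _ (hk2 ▸ pvLab_mem_values hk1)
  have hlb_in : lb ∈ m.keys := by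
    obtain ⟨k, hk1, hk2⟩ := hlb
    exact h.2.1 _ (hk2 ▸ pvLab_mem_values hk1)
  have hkeys : ∀ j, j ∈ m'.keys ↔ j ∈ m.keys := by
    intro j
    rw [hm', pvKeys_foldl_insert_const]
    constructor
    · rintro (hh | hh)
      · exact hh
      · exact ((hmem j).1 hh).1
    · exact Or.inl
  have hlabc : ∀ y, pvLab m' y = if pvLab m y = lb then la else pvLab m y := by
    intro y
    rw [pvLab, hm', pvGetD_foldl_insert_const]
    by_cases hy : pvLab m y = lb
    · rw [if_pos hy]
      by_cases hyk : y ∈ m.keys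
      · rw [if_pos ((hmem y).2 ⟨hyk, hy⟩)]
      · exfalso
        rw [pvLab_not_mem hyk] at hy
        exact hyk (hy ▸ hlb_in)
    · rw [if_neg hy, if_neg (fun hc2 => hy ((hmem y).1 hc2).2)]
      rfl
  have hnd' : m'.keys.Nodup := by
    rw [hm']
    exact PySem.Dict.nodup_keys_foldl_insert ms (fun _ _ => la) m h.1
  refine ⟨⟨hnd', ?_, ?_⟩, hlabc⟩
  · -- values of m' are keys of m'
    intro v hv
    rw [PySem.Dict.values_eq_map_keys m' hnd' ""] at hv
    obtain ⟨k, hk1, hk2⟩ := List.mem_map.1 hv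
    have hk1' : k ∈ m.keys := (hkeys k).1 hk1
    rw [pvGetD_mem hnd' hk1 ""] at hk2
    rw [hlabc k] at hk2
    by_cases hh : pvLab m k = lb
    · rw [if_pos hh] at hk2
      exact (hkeys v).2 (hk2 ▸ hla_in)
    · rw [if_neg hh] at hk2
      exact (hkeys v).2 (hk2 ▸ h.2.1 _ (pvLab_mem_values hk1'))
  · -- class lists of c' describe the classes of m'
    intro l hl y
    have hcget : (c.insert la (c.getD la [] ++ ms)).getD l [] =
        if l = la then c.getD la [] ++ ms else c.getD l [] :=
      PySem.Dict.getD_insert c la l _ []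
    by_cases hlla : l = la
    · subst hlla
      rw [hcget, if_pos rfl, List.mem_append]
      rw [h.2.2 l hla y, hmem y]
      constructor
      · rintro (⟨hy1, hy2⟩ | ⟨hy1, hy2⟩)
        · refine ⟨(hkeys y).2 hy1, ?_⟩
          rw [hlabc, if_neg (fun hh => hne ((hy2.symm.trans hh).symm ▸ rfl))]
          exact hy2
        · refine ⟨(hkeys y).2 hy1, ?_⟩
          rw [hlabc, if_pos hy2]
      · rintro ⟨hy1, hy2⟩
        rw [hlabc] at hy2
        by_cases hh : pvLab m y = lb
        · exact Or.inr ⟨(hkeys y).1 hy1, hh⟩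
        · rw [if_neg hh] at hy2
          exact Or.inl ⟨(hkeys y).1 hy1, hy2⟩
    · -- l is an untouched label: l ≠ la and (since it labels some key of m') l ≠ lb
      obtain ⟨k', hk'1, hk'2⟩ := hl
      rw [hlabc] at hk'2
      have hk'3 : pvLab m k' = l ∧ l ≠ lb := by
        by_cases hh : pvLab m k' = lb
        · rw [if_pos hh] at hk'2; exact absurd hk'2 (fun hh2 => hlla hh2.symm)
        · rw [if_neg hh] at hk'2; exact ⟨hk'2, fun hh2 => hh (hk'2.trans hh2)⟩
      rw [hcget, if_neg hlla]
      rw [h.2.2 l ⟨k', (hkeys k').1 hk'1, hk'3.1⟩ y]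
      constructor
      · rintro ⟨hy1, hy2⟩
        refine ⟨(hkeys y).2 hy1, ?_⟩
        rw [hlabc, if_neg (fun hh => hk'3.2 (hy2.symm.trans hh))]
        exact hy2
      · rintro ⟨hy1, hy2⟩
        rw [hlabc] at hy2
        by_cases hh : pvLab m y = lb
        · rw [if_pos hh] at hy2; exact absurd hy2.symm hlla
        · rw [if_neg hh] at hy2; exact ⟨(hkeys y).1 hy1, hy2⟩

-- ---- B-side specs ----
theorem pvBUnion_spec {lm : PySem.Dict String String × PySem.Dict String (List String)}
    (hm : pvMWF lm.1 lm.2) (a b : String) :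
    pvMWF (pvBUnion lm a b).1 (pvBUnion lm a b).2 ∧
      ∃ l1 l2, ((l1 = pvLab lm.1 a ∧ l2 = pvLab lm.1 b) ∨
          (l1 = pvLab lm.1 b ∧ l2 = pvLab lm.1 a)) ∧
        ∀ y, pvLab (pvBUnion lm a b).1 y =
          if pvLab lm.1 a = pvLab lm.1 b then pvLab lm.1 y
          else if pvLab lm.1 y = l2 then l1 else pvLab lm.1 y := by
  obtain ⟨hm1, hlab1, ha1, hk1⟩ := pvAdd_spec hm a
  simp only [pvBUnion]
  set m1 := if lm.1.contains a then lm.1 else lm.1.insert a a with hm1d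
  set c1 := if lm.1.contains a then lm.2 else lm.2.insert a [a] with hc1d
  obtain ⟨hm2, hlab2, hb2, hk2⟩ := pvAdd_spec hm1 b
  set m2 := if m1.contains b then m1 else m1.insert b b with hm2d
  set c2 := if m1.contains b then c1 else c1.insert b [b] with hc2d
  have hla : m1.getD a a = pvLab lm.1 a := hlab1 a
  have hlb : m2.getD b b = pvLab lm.1 b := by
    rw [show m2.getD b b = pvLab m2 b from rfl, hlab2, hlab1]
  have hlabm2 : ∀ y, pvLab m2 y = pvLab lm.1 y := by intro y; rw [hlab2, hlab1]
  by_cases hg : pvLab lm.1 a = pvLab lm.1 b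
  · have hgd : ¬ m1.getD a a ≠ m2.getD b b := by rw [hla, hlb, hg]; simp
    rw [if_neg hgd]
    exact ⟨hm2, pvLab lm.1 a, pvLab lm.1 b, Or.inl ⟨rfl, rfl⟩,
      fun y => by rw [if_pos hg]; exact hlabm2 y⟩
  · have hgd : m1.getD a a ≠ m2.getD b b := by rw [hla, hlb]; exact hg
    rw [if_pos hgd]
    have ha2 : a ∈ m2.keys := (hk2 a).2 (Or.inr ha1)
    have hEa : ∃ k ∈ m2.keys, pvLab m2 k = m1.getD a a :=
      ⟨a, ha2, by rw [hla, hlabm2]⟩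
    have hEb : ∃ k ∈ m2.keys, pvLab m2 k = m2.getD b b :=
      ⟨b, hb2, by rw [hlb, hlabm2]⟩
    by_cases hsw : (c2.getD (m1.getD a a) []).length < (c2.getD (m2.getD b b) []).length
    · -- swapped: relabel a's class to b's label
      rw [if_pos hsw, if_pos hsw]
      obtain ⟨hmwf', hlab'⟩ := pvMerge_spec hm2 hEb hEa (Ne.symm hgd)
      refine ⟨hmwf', pvLab lm.1 b, pvLab lm.1 a, Or.inr ⟨rfl, rfl⟩, fun y => ?_⟩
      rw [hlab' y, hlabm2 y, if_neg hg, hla, hlb]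
    · rw [if_neg hsw, if_neg hsw]
      obtain ⟨hmwf', hlab'⟩ := pvMerge_spec hm2 hEa hEb hgd
      refine ⟨hmwf', pvLab lm.1 a, pvLab lm.1 b, Or.inl ⟨rfl, rfl⟩, fun y => ?_⟩
      rw [hlab' y, hlabm2 y, if_neg hg, hla, hlb]

-- ---- invariant preservation and phase lemmas ----
theorem pvP_empty (x : String) : pvP (PySem.Dict.empty (κ := String) (ν := String)) x = x := by
  simp [pvP, PySem.Dict.getD_empty]

theorem pvInv_empty : pvInv PySem.Dict.empty (PySem.Dict.empty, PySem.Dict.empty) := by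
  refine ⟨⟨?_, ?_⟩, ⟨?_, ?_, ?_⟩, ?_⟩
  · intro k hk; simp [PySem.Dict.keys_empty] at hk
  · intro x; exact ⟨0, by simp [PySem.Dict.size_empty], by simp [pvIter]; exact pvP_empty x⟩
  · simp [PySem.Dict.keys_empty]
  · intro v hv
    have : (PySem.Dict.empty (κ := String) (ν := String)).values = [] := rfl
    rw [this] at hv
    exact absurd hv List.not_mem_nil
  · intro l hl y
    obtain ⟨k, hk, _⟩ := hl
    have : (PySem.Dict.empty (κ := String) (ν := String)).keys = [] := rfl
    rw [this] at hk
    exact absurd hk List.not_mem_nil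
  · intro x y
    rw [pvRoot_of_fix (pvP_empty x), pvRoot_of_fix (pvP_empty y)]
    rfl

-- equality of merged representatives, characterised as a disjunction over the old classes
theorem pvIteMergeIff (R : String → String) (u v : String) (huv : u ≠ v) (x y : String) :
    ((if R x = v then u else R x) = (if R y = v then u else R y)) ↔
      (R x = R y ∨ ((R x = u ∨ R x = v) ∧ (R y = u ∨ R y = v))) := by
  by_cases h1 : R x = v <;> by_cases h2 : R y = v
  · rw [if_pos h1, if_pos h2]
    constructor
    · intro _; exact Or.inl (h1.trans h2.symm)
    · intro _; rfl
  · rw [if_pos h1, if_neg h2]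
    constructor
    · intro h; exact Or.inr ⟨Or.inr h1, Or.inl h.symm⟩
    · rintro (h | ⟨_, hy | hy⟩)
      · exact absurd (h ▸ h1) h2
      · exact hy.symm
      · exact absurd hy h2
  · rw [if_neg h1, if_pos h2]
    constructor
    · intro h; exact Or.inr ⟨Or.inl h, Or.inr h2⟩
    · rintro (h | ⟨hx | hx, _⟩)
      · exact absurd (h.symm ▸ h2) h1
      · exact hx
      · exact absurd hx h1
  · rw [if_neg h1, if_neg h2]
    constructor
    · exact Or.inl
    · rintro (h | ⟨hx | hx, hy | hy⟩)
      · exact h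
      · exact hx.trans hy.symm
      · exact absurd hy h2
      · exact absurd hx h1
      · exact absurd hx h1

theorem pvInv_union {d : PySem.Dict String String}
    {lm : PySem.Dict String String × PySem.Dict String (List String)}
    (h : pvInv d lm) (a b : String) :
    pvInv (pvUnion d a b) (pvBUnion lm a b) := by
  obtain ⟨hwf, hmwf, hiff⟩ := h
  obtain ⟨hwf', hrootc⟩ := pvUnion_spec hwf a b
  obtain ⟨hmwf', l1, l2, hor, hlabc⟩ := pvBUnion_spec hmwf a b
  refine ⟨hwf', hmwf', ?_⟩
  intro x y
  rw [hrootc x, hrootc y, hlabc x, hlabc y]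
  by_cases hg : pvRoot d a = pvRoot d b
  · have hg' : pvLab lm.1 a = pvLab lm.1 b := (hiff a b).1 hg
    rw [if_pos hg, if_pos hg, if_pos hg', if_pos hg']
    exact hiff x y
  · have hg' : ¬ pvLab lm.1 a = pvLab lm.1 b := fun h2 => hg ((hiff a b).2 h2)
    rw [if_neg hg, if_neg hg, if_neg hg', if_neg hg']
    have hA := pvIteMergeIff (fun z => pvRoot d z) (pvRoot d a) (pvRoot d b) hg x y
    rw [hA]
    have ta : ∀ z, pvRoot d z = pvRoot d a ↔ pvLab lm.1 z = pvLab lm.1 a := fun z => hiff z a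
    have tb : ∀ z, pvRoot d z = pvRoot d b ↔ pvLab lm.1 z = pvLab lm.1 b := fun z => hiff z b
    rcases hor with ⟨h1, h2⟩ | ⟨h1, h2⟩
    · subst h1; subst h2
      have hB := pvIteMergeIff (fun z => pvLab lm.1 z) (pvLab lm.1 a) (pvLab lm.1 b) hg' x y
      rw [hB]
      constructor
      · rintro (hh | ⟨hx, hy⟩)
        · exact Or.inl ((hiff x y).1 hh)
        · exact Or.inr ⟨hx.imp (ta x).1 (tb x).1, hy.imp (ta y).1 (tb y).1⟩
      · rintro (hh | ⟨hx, hy⟩)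
        · exact Or.inl ((hiff x y).2 hh)
        · exact Or.inr ⟨hx.imp (ta x).2 (tb x).2, hy.imp (ta y).2 (tb y).2⟩
    · subst h1; subst h2
      have hB := pvIteMergeIff (fun z => pvLab lm.1 z) (pvLab lm.1 b) (pvLab lm.1 a)
        (fun hh => hg' hh.symm) x y
      rw [hB]
      constructor
      · rintro (hh | ⟨hx, hy⟩)
        · exact Or.inl ((hiff x y).1 hh)
        · exact Or.inr ⟨(hx.imp (ta x).1 (tb x).1).symm, (hy.imp (ta y).1 (tb y).1).symm⟩
      · rintro (hh | ⟨hx, hy⟩)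
        · exact Or.inl ((hiff x y).2 hh)
        · exact Or.inr ⟨(hx.symm.imp (ta x).2 (tb x).2), (hy.symm.imp (ta y).2 (tb y).2)⟩

theorem pvInv_fold_inner (ws : List String) (first : String) {d : PySem.Dict String String}
    {lm : PySem.Dict String String × PySem.Dict String (List String)} (h : pvInv d lm) :
    pvInv (ws.foldl (fun d w => pvUnion d first (PySem.Str.lower w)) d)
      (ws.foldl (fun lm w => pvBUnion lm first (PySem.Str.lower w)) lm) := by
  induction ws generalizing d lm with
  | nil => exact h
  | cons w ws ih => exact ih (pvInv_union h first (PySem.Str.lower w))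

theorem pvInv_fold {d : PySem.Dict String String}
    {lm : PySem.Dict String String × PySem.Dict String (List String)} (h : pvInv d lm)
    (groups : List (List String)) :
    pvInv
      (groups.foldl (fun d group =>
        let first := PySem.Str.lower (PySem.List.pyGetD group 0 "")
        (group.drop 1).foldl (fun d w => pvUnion d first (PySem.Str.lower w)) d) d)
      (groups.foldl (fun lm group =>
        let first := PySem.Str.lower (PySem.List.pyGetD group 0 "")
        (group.drop 1).foldl (fun lm w => pvBUnion lm first (PySem.Str.lower w)) lm) lm) := by
  induction groups generalizing d lm with
  | nil => exact h
  | cons g gs ih => exact ih (pvInv_fold_inner (g.drop 1) _ h)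

theorem pvCheck_spec {d : PySem.Dict String String}
    {lm : PySem.Dict String String × PySem.Dict String (List String)} (h : pvInv d lm)
    (ps : List (String × String)) :
    pvCheck d ps = ps.all (fun p => p.1 == p.2 || lm.1.getD p.1 p.1 == lm.1.getD p.2 p.2) := by
  induction ps generalizing d with
  | nil => rfl
  | cons p rest ih =>
    obtain ⟨w1, w2⟩ := p
    by_cases hw : w1 = w2
    · simp only [pvCheck, if_pos hw, List.all_cons]
      rw [ih h]
      have : (w1 == w2) = true := by simp [hw]
      rw [this]
      simp
    · simp only [pvCheck, if_neg hw]
      obtain ⟨hwf, hmwf, hiff⟩ := h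
      obtain ⟨ha1, ha2, ha3, _⟩ := pvFind_spec hwf w1
      obtain ⟨hb1, hb2, hb3, _⟩ := pvFind_spec ha2 w2
      have hr1 : (pvFind d w1).1 = pvRoot d w1 := ha1
      have hr2 : (pvFind (pvFind d w1).2 w2).1 = pvRoot d w2 := by rw [hb1, ha3]
      have hinv2 : pvInv (pvFind (pvFind d w1).2 w2).2 lm := by
        refine ⟨hb2, hmwf, fun x y => ?_⟩
        rw [hb3, hb3, ha3, ha3]
        exact hiff x y
      have hbeq : (w1 == w2) = false := by simp [hw]
      by_cases hg : pvRoot d w1 = pvRoot d w2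
      · have hne : ¬ (pvFind d w1).1 ≠ (pvFind (pvFind d w1).2 w2).1 := by
          rw [hr1, hr2, hg]; simp
        rw [if_neg hne, ih hinv2, List.all_cons, hbeq]
        have hlab : pvLab lm.1 w1 = pvLab lm.1 w2 := (hiff w1 w2).1 hg
        have : (lm.1.getD w1 w1 == lm.1.getD w2 w2) = true := by
          simp only [beq_iff_eq]; exact hlab
        rw [this]
        simp
      · have hne : (pvFind d w1).1 ≠ (pvFind (pvFind d w1).2 w2).1 := by
          rw [hr1, hr2]; exact hg
        rw [if_pos hne, List.all_cons, hbeq]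
        have hlab : pvLab lm.1 w1 ≠ pvLab lm.1 w2 := fun hc => hg ((hiff w1 w2).2 hc)
        have : (lm.1.getD w1 w1 == lm.1.getD w2 w2) = false := by
          simp only [beq_eq_false_iff_ne, ne_eq]; exact hlab
        rw [this]
        simp

-- ===== VERDICT (by name: the statement is the Claim_ definition above) =====
theorem sentences_equivalent_spec : Claim_equal_sentences_equivalent := by
  intro sent1 sent2 groups _ _
  show sentences_equivalent sent1 sent2 groups = sentences_equivalent_alt sent1 sent2 groups
  unfold sentences_equivalent sentences_equivalent_alt
  simp only []
  split_ifs with h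
  · rfl
  · exact pvCheck_spec (pvInv_fold pvInv_empty groups) _
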